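-- pv_equiv track=rewrite | github.com/ydb-platform/ydb | contrib/restricted/python/ldap3/ldap3/utils/dn.py | escape_rdn
-- ===== SOURCE A (Python) =====
-- def escape_rdn(rdn):
--     """
--     Escape rdn characters to prevent injection according to RFC 4514.
--     """
--
--     # '/' must be handled first or the escape slashes will be escaped!
--     for char in ['\\', ',', '+', '"', '<', '>', ';', '=', '\x00']:
--         rdn = rdn.replace(char, '\\' + char)
--
--     if rdn[0] == '#' or rdn[0] == ' ':
--         rdn = ''.join(('\\', rdn))
--
--     if rdn[-1] == ' ':
--         rdn = ''.join((rdn[:-1], '\\ '))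
--
--     return rdn
-- ===== SOURCE B (Python) =====
-- _SPECIALS = frozenset('\\,+"<>;=\x00')
--
--
-- def escape_rdn(rdn):
--     """
--     Escape rdn characters to prevent injection according to RFC 4514.
--     Single pass over the characters instead of repeated str.replace scans.
--     """
--     out = ''.join('\\' + c if c in _SPECIALS else c for c in rdn)
--
--     if rdn[0] == '#' or rdn[0] == ' ':
--         out = '\\' + out
--
--     if rdn[-1] == ' ':
--         out = out[:-1] + '\\ '
--
--     return out
-- ===== Notes on version B (the rewrite author's own statement) =====
-- stated objective: simpler
-- what changed: Replaces the sequence of nine whole-string str.replace passes (which relies on escaping '\' first to avoid double-escaping) by a single pass that maps each character to its escaped form and joins, checking the boundary characters on the original string.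
import Mathlib
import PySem

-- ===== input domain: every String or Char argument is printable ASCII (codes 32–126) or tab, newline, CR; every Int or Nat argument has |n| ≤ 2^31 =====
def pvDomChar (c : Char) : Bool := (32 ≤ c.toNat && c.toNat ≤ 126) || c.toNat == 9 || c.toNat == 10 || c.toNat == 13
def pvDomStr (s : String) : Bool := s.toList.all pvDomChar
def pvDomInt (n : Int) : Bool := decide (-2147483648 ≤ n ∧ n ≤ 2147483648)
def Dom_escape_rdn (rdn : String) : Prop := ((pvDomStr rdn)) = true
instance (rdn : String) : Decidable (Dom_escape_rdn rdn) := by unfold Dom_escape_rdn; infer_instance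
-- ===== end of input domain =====

-- B is a single pass over the characters instead of nine sequential whole-string replace passes.

-- the RFC 4514 special characters, shared literal of both Python versions
def escSpecials : List Char := ['\\', ',', '+', '"', '<', '>', ';', '=', '\x00']

-- ===== PORT A =====
def escape_rdn (rdn : String) : String :=
  -- for char in [...]: rdn = rdn.replace(char, '\\' + char)
  let r := escSpecials.foldl
    (fun s ch => PySem.Str.replace s (String.ofList [ch]) (String.ofList ['\\', ch])) rdn
  -- if rdn[0] == '#' or rdn[0] == ' ': rdn = ''.join(('\\', rdn))
  let r := if PySem.Str.pyGet? r 0 = some '#' ∨ PySem.Str.pyGet? r 0 = some ' ' then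
      PySem.Str.join "" ["\\", r]
    else r
  -- if rdn[-1] == ' ': rdn = ''.join((rdn[:-1], '\\ '))
  if PySem.Str.pyGet? r (-1) = some ' ' then
    PySem.Str.join "" [PySem.Str.slice r none (some (-1)), "\\ "]
  else r

-- ===== PORT B =====
def escape_rdn_alt (rdn : String) : String :=
  -- out = ''.join('\\' + c if c in _SPECIALS else c for c in rdn)
  let out := String.ofList (rdn.toList.flatMap (fun c => if c ∈ escSpecials then ['\\', c] else [c]))
  -- if rdn[0] == '#' or rdn[0] == ' ': out = '\\' + out
  let out := if PySem.Str.pyGet? rdn 0 = some '#' ∨ PySem.Str.pyGet? rdn 0 = some ' ' then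
      String.ofList ('\\' :: out.toList)
    else out
  -- if rdn[-1] == ' ': out = out[:-1] + '\\ '
  if PySem.Str.pyGet? rdn (-1) = some ' ' then
    String.ofList (out.toList.dropLast ++ ['\\', ' '])
  else out

-- ===== PRECONDITION & SPEC =====
-- Pre_ excludes only the empty string, on which A raises IndexError (rdn[0]).
def Pre_escape_rdn (rdn : String) : Prop := rdn ≠ ""
instance (rdn : String) : Decidable (Pre_escape_rdn rdn) := by unfold Pre_escape_rdn; infer_instance
def pvWitness_escape_rdn : String := "a=b "

def Spec_escape_rdn (rdn : String) (out : String) : Prop := out = escape_rdn_alt rdn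
instance (rdn : String) (out : String) : Decidable (Spec_escape_rdn rdn out) := by unfold Spec_escape_rdn; infer_instance

-- ===== CLAIM (what is proved, stated in full; the proofs are below) =====
def Claim_equal_escape_rdn : Prop := ∀ (rdn : String), Dom_escape_rdn rdn → Pre_escape_rdn rdn → Spec_escape_rdn rdn (escape_rdn rdn)

-- ===== LEMMAS AND PROOFS =====


theorem replace_go_single (a : Char) (new : List Char) :
    ∀ (fuel : Nat) (l acc : List Char), l.length ≤ fuel →
    PySem.Chars.replace.go [a] new fuel l acc
      = acc.reverse ++ l.flatMap (fun c => if c = a then new else [c]) := by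
  intro fuel
  induction fuel with
  | zero => intro l acc h; cases l with
    | nil => simp [PySem.Chars.replace.go]
    | cons c t => simp at h
  | succ n ih =>
    intro l acc h
    cases l with
    | nil => simp [PySem.Chars.replace.go]
    | cons c t =>
      rw [PySem.Chars.replace.go]
      by_cases hca : c = a
      · subst hca
        simp [List.isPrefixOf, ih t _ (by simpa using h)]
      · simp [List.isPrefixOf, hca, Ne.symm hca, ih t _ (by simpa using h)]

theorem replace_single (s : List Char) (a : Char) (new : List Char) :
    PySem.Chars.replace s [a] new = s.flatMap (fun c => if c = a then new else [c]) := by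
  simp [PySem.Chars.replace, replace_go_single a new s.length s [] (le_refl _)]

theorem escPer (c : Char) (Q : List Char) (a : Char) (ha : a ∉ '\\' :: Q) :
    ((if c ∈ '\\' :: Q then ['\\', c] else [c]).flatMap (fun d => if d = a then ['\\', a] else [d]))
      = if c ∈ '\\' :: (Q ++ [a]) then ['\\', c] else [c] := by
  have hsla : ('\\' : Char) ≠ a := fun e => ha (by rw [← e]; exact List.mem_cons_self)
  by_cases h1 : c ∈ '\\' :: Q
  · have hca : c ≠ a := fun e => ha (e ▸ h1)
    have h2 : c ∈ '\\' :: (Q ++ [a]) := by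
      simp only [List.mem_cons, List.mem_append] at h1 ⊢; tauto
    simp [h1, h2, hca, hsla]
  · by_cases hca : c = a
    · subst hca; simp [h1, List.mem_cons, List.mem_append]
    · have h2 : c ∉ '\\' :: (Q ++ [a]) := by
        simp only [List.mem_cons, List.mem_append] at h1 ⊢; tauto
      simp [h1, h2, hca]

theorem escStep (s Q : List Char) (a : Char) (ha : a ∉ '\\' :: Q) :
    ((s.flatMap (fun c => if c ∈ '\\' :: Q then ['\\', c] else [c])).flatMap
        (fun c => if c = a then ['\\', a] else [c]))
      = s.flatMap (fun c => if c ∈ '\\' :: (Q ++ [a]) then ['\\', c] else [c]) := by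
  induction s with
  | nil => simp
  | cons c t ih =>
    simp only [List.flatMap_cons, List.flatMap_append, ih, escPer c Q a ha]

theorem loop_inv (R : List Char) : ∀ (Q s : List Char), R.Nodup → (∀ a ∈ R, a ∉ '\\' :: Q) →
    R.foldl (fun t ch => PySem.Chars.replace t [ch] ['\\', ch])
        (s.flatMap (fun c => if c ∈ '\\' :: Q then ['\\', c] else [c]))
      = s.flatMap (fun c => if c ∈ '\\' :: (Q ++ R) then ['\\', c] else [c]) := by
  induction R with
  | nil => intro Q s _ _; simp
  | cons a R' ih =>
    intro Q s hnd hR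
    obtain ⟨haR', hnd'⟩ := List.nodup_cons.mp hnd
    have ha : a ∉ '\\' :: Q := hR a (by simp)
    rw [List.foldl_cons, replace_single, escStep s Q a ha,
        ih (Q ++ [a]) s hnd' (by
          intro b hb
          have h1 := hR b (List.mem_cons_of_mem a hb)
          have h2 : b ≠ a := fun e => haR' (e ▸ hb)
          simp only [List.mem_cons, List.mem_append] at h1 ⊢
          tauto)]
    simp

set_option maxRecDepth 10000 in
theorem loop_eq (s : List Char) :
    (escSpecials.foldl (fun t ch => PySem.Chars.replace t [ch] ['\\', ch]) s)
      = s.flatMap (fun c => if c ∈ escSpecials then ['\\', c] else [c]) := by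
  show (('\\' :: [',', '+', '"', '<', '>', ';', '=', '\x00']).foldl _ s) = _
  rw [List.foldl_cons, replace_single]
  have h0 : s.flatMap (fun c => if c = '\\' then ['\\', '\\'] else [c])
      = s.flatMap (fun c => if c ∈ '\\' :: ([] : List Char) then ['\\', c] else [c]) := by
    induction s with
    | nil => rfl
    | cons c t ih => simp only [List.flatMap_cons, ih]; congr 1; by_cases h : c = '\\' <;> simp [h]
  rw [h0, loop_inv [',', '+', '"', '<', '>', ';', '=', '\x00'] [] s (by decide) (by intro a ha; fin_cases ha <;> decide)]
  rfl

theorem strFold (L : List Char) : ∀ (r : String),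
    (L.foldl (fun s ch => PySem.Str.replace s (String.ofList [ch]) (String.ofList ['\\', ch])) r).toList
      = L.foldl (fun t ch => PySem.Chars.replace t [ch] ['\\', ch]) r.toList := by
  induction L with
  | nil => intro r; rfl
  | cons a L' ih =>
    intro r
    rw [List.foldl_cons, List.foldl_cons, ih, PySem.Str.toList_replace,
        String.toList_ofList, String.toList_ofList]

theorem flatMap_head (c : Char) (t : List Char) :
    ((c :: t).flatMap (fun d => if d ∈ escSpecials then ['\\', d] else [d])).head?
      = some (if c ∈ escSpecials then '\\' else c) := by
  by_cases h : c ∈ escSpecials <;> simp [h]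

theorem flatMap_getLast? (l : List Char) (hl : l ≠ []) :
    (l.flatMap (fun d => if d ∈ escSpecials then ['\\', d] else [d])).getLast? = l.getLast? := by
  induction l using List.reverseRecOn with
  | nil => simp at hl
  | append_singleton t c _ =>
    rw [List.flatMap_append]
    by_cases h : c ∈ escSpecials <;>
      simp [h, List.getLast?_append]

set_option maxRecDepth 10000 in
theorem main_thm (rdn : String) (hpre : rdn.toList ≠ []) : escape_rdn rdn = escape_rdn_alt rdn := by
  obtain ⟨c, t, hct⟩ : ∃ c t, rdn.toList = c :: t := by
    cases h : rdn.toList with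
    | nil => exact absurd h hpre
    | cons c t => exact ⟨c, t, rfl⟩
  unfold escape_rdn escape_rdn_alt
  generalize hR : (escSpecials.foldl
      (fun s ch => PySem.Str.replace s (String.ofList [ch]) (String.ofList ['\\', ch])) rdn) = R
  have hE : R.toList = (c :: t).flatMap (fun d => if d ∈ escSpecials then ['\\', d] else [d]) := by
    rw [← hR, strFold, loop_eq, hct]
  have h0 : PySem.Str.pyGet? R 0 = some (if c ∈ escSpecials then '\\' else c) := by
    simp only [PySem.Str.pyGet?_eq, PySem.Chars.pyGet?_eq_listPyGet?, PySem.List.pyGet?_zero,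
      ← List.head?_eq_getElem?, hE, flatMap_head]
  have hb0 : PySem.Str.pyGet? rdn 0 = some c := by
    simp only [PySem.Str.pyGet?_eq, PySem.Chars.pyGet?_eq_listPyGet?, PySem.List.pyGet?_zero,
      ← List.head?_eq_getElem?, hct, List.head?_cons]
  have hcond1 : (PySem.Str.pyGet? R 0 = some '#' ∨ PySem.Str.pyGet? R 0 = some ' ')
      ↔ (PySem.Str.pyGet? rdn 0 = some '#' ∨ PySem.Str.pyGet? rdn 0 = some ' ') := by
    rw [h0, hb0]
    by_cases h : c ∈ escSpecials
    · have hc1 : c ≠ '#' := fun e => (by decide : '#' ∉ escSpecials) (e ▸ h)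
      have hc2 : c ≠ ' ' := fun e => (by decide : ' ' ∉ escSpecials) (e ▸ h)
      simp [h, hc1, hc2]
    · simp [h]
  obtain ⟨z, hz⟩ : ∃ z, (c :: t).getLast? = some z := by
    cases h : (c :: t).getLast? with
    | none => simp [List.getLast?_eq_none_iff] at h
    | some z => exact ⟨z, rfl⟩
  have hlastE : R.toList.getLast? = some z := by
    rw [hE, flatMap_getLast? _ (by simp), hz]
  have hlastR : PySem.Str.pyGet? R (-1) = some z := by
    simp only [PySem.Str.pyGet?_eq, PySem.Chars.pyGet?_eq_listPyGet?, PySem.List.pyGet?_neg_one,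
      hlastE]
  have hlastJoin : PySem.Str.pyGet? (PySem.Str.join "" ["\\", R]) (-1) = some z := by
    simp only [PySem.Str.pyGet?_eq, PySem.Chars.pyGet?_eq_listPyGet?, PySem.List.pyGet?_neg_one,
      PySem.Str.toList_join, List.map_cons, List.map_nil, PySem.Chars.join_cons_cons,
      PySem.Chars.join_singleton]
    show (("\\".toList ++ "".toList) ++ R.toList).getLast? = some z
    rw [List.getLast?_append, hlastE]
    rfl
  have hlastB : PySem.Str.pyGet? rdn (-1) = some z := by
    simp only [PySem.Str.pyGet?_eq, PySem.Chars.pyGet?_eq_listPyGet?, PySem.List.pyGet?_neg_one,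
      hct, hz]
  have hs1 : "\\".toList = ['\\'] := rfl
  have hs0 : "".toList = ([] : List Char) := rfl
  have hs2 : "\\ ".toList = ['\\', ' '] := rfl
  by_cases hc1 : (PySem.Str.pyGet? rdn 0 = some '#' ∨ PySem.Str.pyGet? rdn 0 = some ' ')
  · have hA1 := hcond1.mpr hc1
    simp only [hA1, hc1]
    rw [if_pos trivial, if_pos trivial, hlastJoin, hlastB]
    by_cases hz2 : z = ' '
    · subst hz2
      rw [if_pos rfl, if_pos rfl, ← String.toList_inj, String.toList_ofList,
        PySem.Str.toList_join, String.toList_ofList]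
      simp only [List.map_cons, List.map_nil, PySem.Chars.join_cons_cons,
        PySem.Chars.join_singleton, PySem.Str.slice_to_neg_one, PySem.Str.toList_join,
        hs1, hs0, hs2, hE, hct]
      simp
    · have hne : ¬ ((some z : Option Char) = some ' ') := by simpa using hz2
      rw [if_neg hne, if_neg hne, ← String.toList_inj, PySem.Str.toList_join,
        String.toList_ofList, String.toList_ofList]
      simp only [List.map_cons, List.map_nil, PySem.Chars.join_cons_cons,
        PySem.Chars.join_singleton, hs1, hE, hct]
      simp
  · have hA1 : ¬ (PySem.Str.pyGet? R 0 = some '#' ∨ PySem.Str.pyGet? R 0 = some ' ') :=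
      fun h => hc1 (hcond1.mp h)
    simp only []
    rw [if_neg hA1, if_neg hc1, hlastR, hlastB]
    by_cases hz2 : z = ' '
    · subst hz2
      rw [if_pos rfl, if_pos rfl, ← String.toList_inj, PySem.Str.toList_join,
        String.toList_ofList, String.toList_ofList]
      simp only [List.map_cons, List.map_nil, PySem.Chars.join_cons_cons,
        PySem.Chars.join_singleton, PySem.Str.slice_to_neg_one, hs2, hE, hct]
      simp [String.toList_ofList]
    · have hne : ¬ ((some z : Option Char) = some ' ') := by simpa using hz2
      rw [if_neg hne, if_neg hne, ← String.toList_inj, hE, hct]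
      simp [String.toList_ofList]

-- ===== VERDICT (by name: the statement is the Claim_ definition above) =====
set_option maxRecDepth 10000 in
theorem escape_rdn_spec : Claim_equal_escape_rdn := by
  intro rdn _ hpre
  unfold Spec_escape_rdn
  have hl : rdn.toList ≠ [] := by
    intro h
    exact hpre (String.toList_inj.mp (h.trans (rfl : ([] : List Char) = "".toList)))
  exact main_thm rdn hl
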